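-- pv_equiv track=rewrite | github.com/ccubc/DS_self_learning | leetcode_algorithm/leetcode_easy_914.py | solution
-- ===== SOURCE A (Python) =====
-- def gcd(a,b): # get common divider of two integers
--     a, b = (a, b) if a>=b else (b, a)
--     while b:
--         a, b = b, a%b
--     return a
--
-- def gcd_multi(list_number): # get common divider from a list of number
--     while len(list_number)>1:
--         a = list_number.pop()
--         b = list_number.pop()
--         c = gcd(a,b)
--         list_number.append(c)
--     return list_number.pop()
--
-- def solution(deck):
--     dictionary = {x:deck.count(x) for x in deck}
--     dictionary_values = list(dictionary.values())
--     unique_d_value = list(set(dictionary_values))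
--     unique_d_value.sort(reverse=True)
--     if unique_d_value[-1]==1: # deck contains unique value card
--         return False
--     else:
--         if len(unique_d_value) == 1:
--             return True
--         else:
--             gcd = gcd_multi(unique_d_value)
--             return (gcd>1)
-- ===== SOURCE B (Python) =====
-- def solution(deck):
--     tally = {}
--     for x in deck:
--         tally[x] = tally.get(x, 0) + 1
--     counts = sorted(tally.values())
--     smallest = counts[0]
--     for d in range(2, smallest + 1):
--         if all(c % d == 0 for c in counts):
--             return True
--     return False
-- ===== Notes on version B (the rewrite author's own statement) =====
-- stated objective: faster
-- what changed: Replaces A's quadratic deck.count-per-element comprehension plus Euclidean gcd reduction over the distinct counts by a single counting pass and a brute-force search for a common divisor d in range(2, min_count+1).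
import Mathlib
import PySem

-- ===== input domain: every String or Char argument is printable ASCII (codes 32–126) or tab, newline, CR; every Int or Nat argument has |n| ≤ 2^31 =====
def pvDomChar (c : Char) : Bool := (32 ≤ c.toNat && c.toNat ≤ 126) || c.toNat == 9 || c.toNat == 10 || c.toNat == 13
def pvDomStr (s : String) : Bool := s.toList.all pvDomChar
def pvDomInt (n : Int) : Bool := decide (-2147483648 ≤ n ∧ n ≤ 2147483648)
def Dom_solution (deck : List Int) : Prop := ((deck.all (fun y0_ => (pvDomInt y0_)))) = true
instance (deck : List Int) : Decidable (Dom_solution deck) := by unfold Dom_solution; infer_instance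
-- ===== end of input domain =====

-- B replaces A's quadratic count-per-element comprehension and Euclidean gcd reduction by one
-- counting pass and a brute-force common-divisor search over range(2, min_count+1) (measured faster).

-- ===== PORT A =====

-- termination fact for the Euclidean while-loop (cited by pyGcdLoop's decreasing_by)
theorem pv_natAbs_mod_lt (a b : Int) (hb : ¬ b = 0) :
    (PySem.Int.mod a b).natAbs < b.natAbs := by
  rcases lt_or_gt_of_ne hb with h | h
  · have h1 := PySem.Int.mod_neg_bounds a h
    omega
  · have h1 := PySem.Int.mod_nonneg a h
    have h2 := PySem.Int.mod_lt a h
    omega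

-- while b: a, b = b, a % b
def pyGcdLoop (a b : Int) : Int :=
  if hb : b = 0 then a
  else pyGcdLoop b (PySem.Int.mod a b)
termination_by b.natAbs
decreasing_by exact pv_natAbs_mod_lt a b hb

-- def gcd(a, b)
def pyGcd (a b : Int) : Int :=
  let p := if a ≥ b then (a, b) else (b, a)
  pyGcdLoop p.1 p.2

-- def gcd_multi(list_number): pops from the end, appends the gcd; the `none`
-- branches are Python's IndexError on pop from an empty list (never reached on
-- the nonempty lists solution feeds it)
def gcdMulti (l : List Int) : Int :=
  if l.length > 1 then
    match h1 : PySem.List.pop? l (-1) with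
    | some (a, l1) =>
      match h2 : PySem.List.pop? l1 (-1) with
      | some (b, l2) => gcdMulti (l2 ++ [pyGcd a b])
      | none => 0
    | none => 0
  else ((PySem.List.pop? l (-1)).map (·.1)).getD 0
termination_by l.length
decreasing_by
  have e1 : l1.length + 1 = l.length := PySem.List.length_of_pop?_eq_some l h1
  have e2 : l2.length + 1 = l1.length := PySem.List.length_of_pop?_eq_some l1 h2
  simp only [List.length_append, List.length_cons, List.length_nil]
  omega

-- def solution(deck); unique_d_value[-1] = none is Python's IndexError on an
-- empty deck, excluded by Pre_.  list(set(..)) + in-place sort is ported as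
-- sorted(set(..), reverse=True): the counts are distinct there, so the sorted
-- result does not depend on the set's iteration order.
def solution (deck : List Int) : Bool :=
  let dictionary := deck.foldl
    (fun d x => d.insert x ((PySem.List.count deck x : Nat) : Int)) PySem.Dict.empty
  let dictionaryValues := PySem.Dict.values dictionary
  let uniqueDValue := PySem.List.sorted (PySem.Set.ofList dictionaryValues) (fun x => x) true
  match PySem.List.pyGet? uniqueDValue (-1) with
  | none => false
  | some last =>
    if last = 1 then false
    else if uniqueDValue.length = 1 then true
    else decide (gcdMulti uniqueDValue > 1)

-- ===== PORT B =====

-- counts[0] = none is Python's IndexError on an empty deck, excluded by Pre_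
def solution_alt (deck : List Int) : Bool :=
  let tally := deck.foldl (fun d x => d.insert x (d.getD x 0 + 1)) PySem.Dict.empty
  let counts := PySem.List.sorted (PySem.Dict.values tally) (fun x => x) false
  match PySem.List.pyGet? counts 0 with
  | none => false
  | some smallest =>
    (PySem.List.pyRange 2 (smallest + 1) 1).any (fun d =>
      counts.all (fun c => PySem.Int.mod c d == 0))

-- ===== PRECONDITION & SPEC =====

-- On the empty deck both A and B hit IndexError; everything else is admitted.
def Pre_solution (deck : List Int) : Prop := deck ≠ []
instance (deck : List Int) : Decidable (Pre_solution deck) := by unfold Pre_solution; infer_instance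

def pvWitness_solution : List Int := [1, 2, 2]

def Spec_solution (deck : List Int) (out : Bool) : Prop := out = solution_alt deck
instance (deck : List Int) (out : Bool) : Decidable (Spec_solution deck out) := by unfold Spec_solution; infer_instance

-- ===== CLAIM (what is proved, stated in full; the proofs are below) =====
def Claim_equal_solution : Prop := ∀ (deck : List Int), Dom_solution deck → Pre_solution deck → Spec_solution deck (solution deck)

-- ===== LEMMAS AND PROOFS =====

-- common divisor predicate both programs decide
def HasCD (V : List Int) : Prop := ∃ d : Int, 2 ≤ d ∧ ∀ c ∈ V, d ∣ c

def listGcd (l : List Int) : Nat := l.foldr (fun x g => Nat.gcd x.natAbs g) 0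

theorem int_gcd_euclid (a b : Int) (ha : 0 ≤ a) (hb : 0 < b) :
    Int.gcd b (a % b) = Int.gcd a b := by
  lift a to Nat using ha
  lift b to Nat using hb.le
  rw [← Int.natCast_emod]
  simp only [Int.gcd, Int.natAbs_natCast]
  rw [Nat.gcd_comm b (a % b), ← Nat.gcd_rec b a, Nat.gcd_comm b a]

theorem pyGcdLoop_eq (n : Nat) : ∀ a b : Int, b.natAbs = n → 0 ≤ a → 0 ≤ b →
    pyGcdLoop a b = (Int.gcd a b : Int) := by
  induction n using Nat.strong_induction_on with
  | _ n ih =>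
    intro a b hn ha hb
    rw [pyGcdLoop]
    by_cases h0 : b = 0
    · subst h0
      simp [Int.gcd, Int.natAbs_of_nonneg ha]
    · have hbpos : 0 < b := lt_of_le_of_ne hb (Ne.symm h0)
      simp only [h0, dite_false]
      rw [PySem.Int.mod_eq_emod_of_pos hbpos]
      have hlt : (a % b).natAbs < n := by
        have h1 := Int.emod_nonneg a h0
        have h2 := Int.emod_lt_of_pos a hbpos
        omega
      rw [ih _ hlt b (a % b) rfl hb (Int.emod_nonneg a h0)]
      rw [int_gcd_euclid a b ha hbpos]

theorem pyGcd_eq (a b : Int) (ha : 0 ≤ a) (hb : 0 ≤ b) :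
    pyGcd a b = (Int.gcd a b : Int) := by
  unfold pyGcd
  by_cases h : a ≥ b
  · simp only [h, if_pos]
    exact pyGcdLoop_eq b.natAbs a b rfl ha hb
  · simp only [h, if_neg, not_false_iff]
    rw [pyGcdLoop_eq a.natAbs b a rfl hb ha, Int.gcd_comm]

theorem gcdMulti_eq (n : Nat) : ∀ l : List Int, l.length = n → l ≠ [] → (∀ x ∈ l, 0 ≤ x) →
    gcdMulti l = (listGcd l : Int) := by
  induction n using Nat.strong_induction_on with
  | _ n ih =>
    intro l hn hne hnn
    rcases List.eq_nil_or_concat l with rfl | ⟨l1, a, rfl⟩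
    · exact absurd rfl hne
    rcases List.eq_nil_or_concat l1 with rfl | ⟨l2, b, rfl⟩
    · -- singleton [a]
      have ha : 0 ≤ a := hnn a (by simp)
      rw [gcdMulti.eq_def]
      simp only [List.concat_eq_append, List.nil_append]
      rw [if_neg (by simp : ¬ ([a] : List Int).length > 1)]
      rw [show ([a] : List Int) = [] ++ [a] from rfl, PySem.List.pop?_last]
      simp [listGcd, Int.natAbs_of_nonneg ha]
    · -- l = l2 ++ [b] ++ [a]
      simp only [List.concat_eq_append] at hn hne hnn ⊢
      have ha : 0 ≤ a := hnn a (by simp)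
      have hb : 0 ≤ b := hnn b (by simp)
      rw [gcdMulti.eq_def]
      rw [if_pos (by simp : (l2 ++ [b] ++ [a]).length > 1)]
      have hstep : gcdMulti (l2 ++ [pyGcd a b]) = (listGcd (l2 ++ [b] ++ [a]) : Int) := by
        have hrec : gcdMulti (l2 ++ [pyGcd a b]) = (listGcd (l2 ++ [pyGcd a b]) : Int) := by
          apply ih (l2.length + 1) (by simp at hn; omega) _ (by simp) (by simp)
          intro x hx
          rcases List.mem_append.mp hx with hx | hx
          · exact hnn x (by simp [hx])
          · simp only [List.mem_singleton] at hx
            subst hx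
            rw [pyGcd_eq a b ha hb]
            exact Int.natCast_nonneg _
        rw [hrec]
        congr 1
        unfold listGcd
        rw [List.foldr_append, List.foldr_append, List.foldr_append]
        simp only [List.foldr_cons, List.foldr_nil]
        congr 1
        rw [pyGcd_eq a b ha hb]
        simp only [Int.natAbs_natCast, Nat.gcd_zero_right]
        rw [Int.gcd, Nat.gcd_comm]
      split
      next a1 l1 h1 =>
        rw [PySem.List.pop?_last] at h1
        simp only [Option.some.injEq, Prod.mk.injEq] at h1
        obtain ⟨rfl, rfl⟩ := h1
        split
        next b1 l1' h2 =>
          rw [PySem.List.pop?_last] at h2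
          simp only [Option.some.injEq, Prod.mk.injEq] at h2
          obtain ⟨rfl, rfl⟩ := h2
          exact hstep
        next h2 =>
          rw [PySem.List.pop?_last] at h2
          simp at h2
      next h1 =>
        rw [PySem.List.pop?_last] at h1
        simp at h1

theorem listGcd_dvd (l : List Int) (x : Int) (hx : x ∈ l) : (listGcd l : Int) ∣ x := by
  rw [← Int.dvd_natAbs, Int.natCast_dvd_natCast]
  induction l with
  | nil => simp at hx
  | cons y t iht =>
    simp only [listGcd, List.foldr_cons]
    rcases List.mem_cons.mp hx with rfl | hx
    · exact Nat.gcd_dvd_left _ _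
    · exact dvd_trans (Nat.gcd_dvd_right _ _) (iht hx)

theorem dvd_listGcd (l : List Int) (d : Int) (h : ∀ x ∈ l, d ∣ x) : d ∣ (listGcd l : Int) := by
  rw [← Int.natAbs_dvd, Int.natCast_dvd_natCast]
  induction l with
  | nil => simp [listGcd]
  | cons y t iht =>
    simp only [listGcd, List.foldr_cons]
    refine Nat.dvd_gcd ?_ (iht (fun x hx => h x (List.mem_cons_of_mem y hx)))
    exact Int.natAbs_dvd_natAbs.mpr (h y (List.mem_cons_self))

theorem last_le_of_pairwise_ge (l : List Int) (m : Int) (hl : l.getLast? = some m)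
    (hp : l.Pairwise (fun a b => b ≤ a)) : ∀ y ∈ l, m ≤ y := by
  induction l with
  | nil => simp at hl
  | cons x t ih =>
    cases t with
    | nil =>
      simp only [List.getLast?_singleton, Option.some.injEq] at hl
      subst hl
      simp
    | cons z t' =>
      rw [List.getLast?_cons_cons] at hl
      have hp' := List.pairwise_cons.mp hp
      have hmem : m ∈ z :: t' := by
        obtain ⟨l', hz⟩ := List.getLast?_eq_some_iff.mp hl
        rw [hz]
        simp
      intro y hy
      rcases List.mem_cons.mp hy with rfl | hy
      · exact hp'.1 m hmem
      · exact ih hl hp'.2 y hy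

theorem getD_foldl_insert_const (c : Int → Int) (l : List Int) :
    ∀ (d : PySem.Dict Int Int) (k dflt : Int),
      (l.foldl (fun d x => d.insert x (c x)) d).getD k dflt
        = if k ∈ l then c k else d.getD k dflt := by
  induction l with
  | nil => simp
  | cons x t ih =>
    intro d k dflt
    simp only [List.foldl_cons, ih, PySem.Dict.getD_insert, List.mem_cons]
    by_cases hkt : k ∈ t
    · simp [hkt]
    · by_cases hkx : k = x
      · simp [hkx]
      · simp [hkx, hkt]

theorem dictA_eq_counter (deck : List Int) :
    deck.foldl (fun d x => d.insert x ((PySem.List.count deck x : Nat) : Int)) PySem.Dict.empty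
      = PySem.Dict.counter deck := by
  apply PySem.Dict.ext
  have hnd : (deck.foldl (fun d x => d.insert x ((PySem.List.count deck x : Nat) : Int))
      PySem.Dict.empty).keys.Nodup :=
    PySem.Dict.nodup_keys_foldl_insert deck _ _ PySem.Dict.nodup_keys_empty
  rw [PySem.Dict.items_eq_map_keys _ hnd 0, PySem.Dict.items_counter,
    PySem.Dict.keys_foldl_insert]
  have hkeys : PySem.Set.update (PySem.Dict.empty : PySem.Dict Int Int).keys deck
      = PySem.Set.ofList deck := by
    rw [PySem.Dict.keys_empty, PySem.Set.ofList_eq_foldl]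
    rfl
  rw [hkeys]
  apply List.map_congr_left
  intro k hk
  have hkdeck : k ∈ deck := (PySem.Set.mem_ofList deck k).mp hk
  rw [getD_foldl_insert_const]
  simp [hkdeck, PySem.List.count_eq]

theorem values_counter (deck : List Int) :
    PySem.Dict.values (PySem.Dict.counter deck)
      = (PySem.Set.ofList deck).map (fun k => ((List.count k deck : Nat) : Int)) := by
  show (PySem.Dict.counter deck).items.map (·.2) = _
  rw [PySem.Dict.items_counter]
  simp [List.map_map, Function.comp]

theorem A_core (V : List Int) (hne : V ≠ []) (hpos : ∀ c ∈ V, 1 ≤ c) :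
    (match PySem.List.pyGet? (PySem.List.sorted (PySem.Set.ofList V) (fun x => x) true) (-1) with
     | none => false
     | some last =>
       if last = 1 then false
       else if (PySem.List.sorted (PySem.Set.ofList V) (fun x => x) true).length = 1 then true
       else decide (gcdMulti (PySem.List.sorted (PySem.Set.ofList V) (fun x => x) true) > 1))
    = true ↔ HasCD V := by
  set U := PySem.List.sorted (PySem.Set.ofList V) (fun x => x) true with hU
  have hUV : ∀ x, x ∈ U ↔ x ∈ V := by
    intro x
    rw [hU, PySem.List.mem_sorted, PySem.Set.mem_ofList]
  have hUne : U ≠ [] := by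
    intro h
    rw [hU, PySem.List.sorted_eq_nil_iff] at h
    obtain ⟨x, hx⟩ := List.exists_mem_of_ne_nil V hne
    have := (PySem.Set.mem_ofList V x).mpr hx
    simp [h] at this
  obtain ⟨m, hlast⟩ := Option.isSome_iff_exists.mp (List.getLast?_isSome.mpr hUne)
  have hget : PySem.List.pyGet? U (-1) = some m := by
    rw [PySem.List.pyGet?_neg_one, hlast]
  rw [hget]
  have hmU : m ∈ U := by
    obtain ⟨l', hz⟩ := List.getLast?_eq_some_iff.mp hlast
    rw [hz]
    simp
  have hmV : m ∈ V := (hUV m).mp hmU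
  have hmin : ∀ y ∈ V, m ≤ y := by
    intro y hy
    exact last_le_of_pairwise_ge U m hlast (PySem.List.sorted_pairwise_rev _ _) y ((hUV y).mpr hy)
  have hm1 : 1 ≤ m := hpos m hmV
  by_cases hm : m = 1
  · simp only [if_pos hm, Bool.false_eq_true, false_iff]
    rintro ⟨d, hd2, hall⟩
    have hd1 := Int.le_of_dvd one_pos (hall 1 (hm ▸ hmV))
    omega
  · simp only [if_neg hm]
    have hm2 : 2 ≤ m := by omega
    by_cases hlen : U.length = 1
    · simp only [if_pos hlen]
      have hUm : U = [m] := by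
        obtain ⟨u, hu⟩ := List.length_eq_one_iff.mp hlen
        rw [hu] at hlast ⊢
        simp only [List.getLast?_singleton, Option.some.injEq] at hlast
        rw [hlast]
      constructor
      · intro _
        refine ⟨m, hm2, fun c hc => ?_⟩
        have : c ∈ U := (hUV c).mpr hc
        rw [hUm] at this
        simp only [List.mem_singleton] at this
        rw [this]
      · intro _
        trivial
    · simp only [if_neg hlen]
      have hUnn : ∀ x ∈ U, 0 ≤ x := fun x hx => le_trans zero_le_one (hpos x ((hUV x).mp hx))
      rw [gcdMulti_eq U.length U rfl hUne hUnn, decide_eq_true_eq]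
      constructor
      · intro hg
        refine ⟨(listGcd U : Int), by exact_mod_cast hg, fun c hc => ?_⟩
        exact listGcd_dvd U c ((hUV c).mpr hc)
      · rintro ⟨d, hd2, hall⟩
        have hdg : d ∣ (listGcd U : Int) := dvd_listGcd U d (fun x hx => hall x ((hUV x).mp hx))
        have hgm : (listGcd U : Int) ∣ m := listGcd_dvd U m hmU
        have hgpos : 0 < (listGcd U : Int) := by
          rcases Nat.eq_zero_or_pos (listGcd U) with h0 | hpos'
          · exfalso
            rw [h0] at hgm
            simp only [Nat.cast_zero, zero_dvd_iff] at hgm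
            omega
          · exact_mod_cast hpos'
        have hdle := Int.le_of_dvd hgpos hdg
        omega

theorem B_core (V : List Int) (hne : V ≠ []) (hpos : ∀ c ∈ V, 1 ≤ c) :
    (match PySem.List.pyGet? (PySem.List.sorted V (fun x => x) false) 0 with
     | none => false
     | some smallest =>
       (PySem.List.pyRange 2 (smallest + 1) 1).any (fun d =>
         (PySem.List.sorted V (fun x => x) false).all (fun c => PySem.Int.mod c d == 0)))
    = true ↔ HasCD V := by
  set S := PySem.List.sorted V (fun x => x) false with hS
  have hSV : ∀ x, x ∈ S ↔ x ∈ V := by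
    intro x
    rw [hS, PySem.List.mem_sorted]
  have hSne : S ≠ [] := by
    intro h
    exact hne ((PySem.List.sorted_eq_nil_iff V _ false).mp (hS ▸ h))
  obtain ⟨m0, t, hcons⟩ := List.exists_cons_of_ne_nil hSne
  have hget : PySem.List.pyGet? S 0 = some m0 := by
    rw [PySem.List.pyGet?_zero, hcons]
    rfl
  rw [hget]
  have hm0V : m0 ∈ V := (hSV m0).mp (hcons ▸ List.mem_cons_self)
  have hmin : ∀ y ∈ V, m0 ≤ y :=
    PySem.List.key_head_sorted_le V (fun x => x) (hS.symm.trans hcons)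
  have hm01 : 1 ≤ m0 := hpos m0 hm0V
  rw [List.any_eq_true]
  constructor
  · rintro ⟨d, hd, hall⟩
    rw [List.all_eq_true] at hall
    have hd2 := (PySem.List.mem_pyRange_one.mp hd).1
    refine ⟨d, hd2, fun c hc => ?_⟩
    have := hall c ((hSV c).mpr hc)
    rw [beq_iff_eq, PySem.Int.mod_eq_zero_iff_dvd] at this
    exact this
  · rintro ⟨d, hd2, hall⟩
    have hdm0 : d ≤ m0 := Int.le_of_dvd (by omega) (hall m0 hm0V)
    refine ⟨d, PySem.List.mem_pyRange_one.mpr ⟨hd2, by omega⟩, ?_⟩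
    rw [List.all_eq_true]
    intro c hc
    rw [beq_iff_eq, PySem.Int.mod_eq_zero_iff_dvd]
    exact hall c ((hSV c).mp hc)

-- ===== VERDICT (by name: the statement is the Claim_ definition above) =====
theorem solution_spec : Claim_equal_solution := by
  intro deck _ hpre
  unfold Spec_solution solution solution_alt
  simp only [dictA_eq_counter, PySem.Dict.foldl_insert_getD_add_one_eq_counter]
  have hV : PySem.Dict.values (PySem.Dict.counter deck)
      = (PySem.Set.ofList deck).map (fun k => ((List.count k deck : Nat) : Int)) :=
    values_counter deck
  set V := PySem.Dict.values (PySem.Dict.counter deck) with hVdef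
  have hne : V ≠ [] := by
    rw [hV]
    obtain ⟨x, hx⟩ := List.exists_mem_of_ne_nil deck hpre
    intro h
    rw [List.map_eq_nil_iff] at h
    have := (PySem.Set.mem_ofList deck x).mpr hx
    simp [h] at this
  have hpos : ∀ c ∈ V, 1 ≤ c := by
    rw [hV]
    intro c hc
    obtain ⟨k, hk, rfl⟩ := List.mem_map.mp hc
    have hkdeck : k ∈ deck := (PySem.Set.mem_ofList deck k).mp hk
    have : 0 < List.count k deck := List.count_pos_iff.mpr hkdeck
    exact_mod_cast this
  rw [Bool.eq_iff_iff, A_core V hne hpos, B_core V hne hpos]
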